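-- pv_equiv track=rewrite | github.com/Kritis11/math-api-service | main.py | focus_text
-- ===== SOURCE A (Python) =====
-- def focus_text(query):
--     q = query.lower()
--     markers = [
--         "actual task:",
--         "task:",
--         "question:",
--         "solve:",
--         "compute:",
--         "calculate:",
--         "find:",
--     ]
--     best_idx = -1
--     best_len = 0
--     for marker in markers:
--         idx = q.rfind(marker)
--         if idx > best_idx:
--             best_idx = idx
--             best_len = len(marker)
--     if best_idx != -1:
--         return query[best_idx + best_len:].strip()
--     return query
-- ===== SOURCE B (Python) =====
-- def focus_text(query):
--     markers = (
--         "actual task:",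
--         "task:",
--         "question:",
--         "solve:",
--         "compute:",
--         "calculate:",
--         "find:",
--     )
--     q = query.lower()
--     for i in range(len(q) - 1, -1, -1):
--         for m in markers:
--             if q[i:i + len(m)] == m:
--                 return query[i + len(m):].strip()
--     return query
-- ===== Notes on version B (the rewrite author's own statement) =====
-- stated objective: alternative
-- what changed: A runs seven independent rfind passes over the lowercased query and keeps the best (largest) start index; B makes a single backward scan over positions of the query, returning at the first position (hence the last overall) where any marker matches.
import Mathlib
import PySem

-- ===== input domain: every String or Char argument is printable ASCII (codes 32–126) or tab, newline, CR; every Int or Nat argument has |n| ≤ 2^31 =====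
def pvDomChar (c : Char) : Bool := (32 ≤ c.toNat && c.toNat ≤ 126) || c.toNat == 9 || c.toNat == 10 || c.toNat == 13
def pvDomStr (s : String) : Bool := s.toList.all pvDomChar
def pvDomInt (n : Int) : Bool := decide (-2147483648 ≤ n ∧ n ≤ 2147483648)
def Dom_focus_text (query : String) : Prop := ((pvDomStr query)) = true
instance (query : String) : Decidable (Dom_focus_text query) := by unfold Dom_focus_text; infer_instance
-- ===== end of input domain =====

-- B replaces A's seven independent rfind passes (keeping the largest start index) by one
-- backward scan over positions that returns at the first marker occurrence it meets
-- (objective: alternative single-pass structure; same return value everywhere).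

-- ===== PORT A =====
def aMarkers : List String :=
  ["actual task:", "task:", "question:", "solve:", "compute:", "calculate:", "find:"]

def focus_text (query : String) : String :=
  let q := PySem.Str.lower query
  let best := aMarkers.foldl
    (fun (st : Int × Int) marker =>
      let idx := PySem.Str.rfind q marker
      if idx > st.1 then (idx, PySem.Str.len marker) else st)
    (-1, 0)
  if best.1 ≠ -1 then
    PySem.Str.strip (PySem.Str.slice query (some (best.1 + best.2)) none)
  else
    query

-- ===== PORT B =====
def bMarkers : List String :=
  ["actual task:", "task:", "question:", "solve:", "compute:", "calculate:", "find:"]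

-- the backward 'for i in range(len(q)-1, -1, -1)' loop of Source B; counter k+1 means i = k
def bScan (q query : String) : Nat → String
  | 0 => query
  | k + 1 =>
    match bMarkers.find?
        (fun m => PySem.Str.slice q (some (k : Int)) (some ((k : Int) + PySem.Str.len m)) == m) with
    | some m => PySem.Str.strip (PySem.Str.slice query (some ((k : Int) + PySem.Str.len m)) none)
    | none => bScan q query k

def focus_text_alt (query : String) : String :=
  let q := PySem.Str.lower query
  bScan q query (PySem.Str.len q).toNat

-- ===== PRECONDITION & SPEC =====
def Spec_focus_text (query : String) (out : String) : Prop := out = focus_text_alt query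
instance (query : String) (out : String) : Decidable (Spec_focus_text query out) := by unfold Spec_focus_text; infer_instance

-- ===== CLAIM (what is proved, stated in full; the proofs are below) =====
def Claim_equal_focus_text : Prop := ∀ (query : String), Dom_focus_text query → Spec_focus_text query (focus_text query)

-- ===== LEMMAS AND PROOFS =====

-- greatest match position below k (as Int, -1 if none): the value rfind computes, cut at k
def pvRb (ql m : List Char) : Nat → Int
  | 0 => -1
  | k + 1 => if m.isPrefixOf (ql.drop k) then (k : Int) else pvRb ql m k

-- the body of A's fold, with the index function abstracted
def pvStep (f : String → Int) (st : Int × Int) (m : String) : Int × Int :=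
  if f m > st.1 then (f m, PySem.Str.len m) else st

theorem pvRb_lt (ql m : List Char) : ∀ k, pvRb ql m k < (k : Int) := by
  intro k
  induction k with
  | zero => simp [pvRb]
  | succ k ih =>
    simp only [pvRb]
    split
    · omega
    · omega

theorem pvGo_eq (ql m : List Char) : ∀ j, PySem.Chars.rfind.go ql m j = pvRb ql m (j + 1) := by
  intro j
  induction j with
  | zero => simp [PySem.Chars.rfind.go, pvRb]
  | succ j ih =>
    simp only [PySem.Chars.rfind.go, pvRb, ih]

theorem pvRfind_eq (ql m : List Char) : PySem.Chars.rfind ql m = pvRb ql m (ql.length + 1) := by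
  simpa [PySem.Chars.rfind] using pvGo_eq ql m ql.length

theorem pvRb_top (ql m : List Char) (hm : m ≠ []) :
    pvRb ql m (ql.length + 1) = pvRb ql m ql.length := by
  simp only [pvRb, List.drop_length]
  cases m with
  | nil => exact absurd rfl hm
  | cons a l => simp [List.isPrefixOf]

theorem pvFold_keep (f : String → Int) : ∀ (ms : List String) (st : Int × Int),
    (∀ m ∈ ms, f m ≤ st.1) → ms.foldl (pvStep f) st = st := by
  intro ms
  induction ms with
  | nil => intro st _; rfl
  | cons m ms ih =>
    intro st h
    have hm : f m ≤ st.1 := h m (by simp)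
    simp only [List.foldl_cons, pvStep, if_neg (by omega : ¬ f m > st.1)]
    exact ih st (fun m' hm' => h m' (by simp [hm']))

theorem pvFold_pick (f : String → Int) : ∀ (ms : List String) (st : Int × Int) (m0 : String) (v : Int),
    m0 ∈ ms → f m0 = v → (∀ m ∈ ms, m ≠ m0 → f m < v) → st.1 < v →
    ms.foldl (pvStep f) st = (v, PySem.Str.len m0) := by
  intro ms
  induction ms with
  | nil => intro st m0 v h; exact absurd h (by simp)
  | cons m ms ih =>
    intro st m0 v hmem hv hlt hst
    by_cases hm : m = m0
    · subst hm
      simp only [List.foldl_cons, pvStep, hv, if_pos hst]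
      refine pvFold_keep f ms (v, PySem.Str.len m) ?_
      intro m' hm'
      by_cases h' : m' = m
      · subst h'; omega
      · have := hlt m' (by simp [hm']) h'; omega
    · have hm0 : m0 ∈ ms := by
        rcases List.mem_cons.mp hmem with h | h
        · exact absurd h.symm hm
        · exact h
      have hfm : f m < v := hlt m (by simp) hm
      simp only [List.foldl_cons, pvStep]
      split
      · exact ih _ m0 v hm0 hv (fun m' h' h'' => hlt m' (by simp [h']) h'') (by omega)
      · exact ih _ m0 v hm0 hv (fun m' h' h'' => hlt m' (by simp [h']) h'') hst

theorem pvMarkers_eq : aMarkers = bMarkers := rfl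

theorem pvMarkers_uniq :
    ∀ m ∈ aMarkers, ∀ m' ∈ aMarkers, m.toList <+: m'.toList → m = m' := by decide

theorem pvMarkers_ne_nil : ∀ m ∈ aMarkers, m.toList ≠ [] := by decide

theorem pvTest_iff (q m : String) (k : Nat) :
    ((PySem.Str.slice q (some (k : Int)) (some ((k : Int) + PySem.Str.len m)) == m) = true)
      ↔ m.toList <+: q.toList.drop k := by
  rw [beq_iff_eq]
  constructor
  · intro h
    have h' := congrArg String.toList h
    rw [PySem.Str.toList_slice, PySem.Chars.slice_eq_listSlice, PySem.Str.len,
        PySem.List.slice_natCast_add] at h'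
    exact List.prefix_iff_eq_take.mpr h'.symm
  · intro h
    have h' := List.prefix_iff_eq_take.mp h
    apply String.ext
    show (PySem.Str.slice q (some (k : Int)) (some ((k : Int) + PySem.Str.len m))).toList = m.toList
    rw [PySem.Str.toList_slice, PySem.Chars.slice_eq_listSlice, PySem.Str.len,
        PySem.List.slice_natCast_add]
    exact h'.symm

theorem pvScan_eq (q query : String) : ∀ k : Nat,
    bScan q query k =
      (if (aMarkers.foldl (pvStep (fun m => pvRb q.toList m.toList k)) (-1, 0)).1 ≠ -1 then
        PySem.Str.strip (PySem.Str.slice query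
          (some ((aMarkers.foldl (pvStep (fun m => pvRb q.toList m.toList k)) (-1, 0)).1 +
                 (aMarkers.foldl (pvStep (fun m => pvRb q.toList m.toList k)) (-1, 0)).2)) none)
      else query) := by
  intro k
  induction k with
  | zero =>
    rw [pvFold_keep _ _ _ (by intro m _; simp [pvRb])]
    simp [bScan]
  | succ k ih =>
    rcases hfind : bMarkers.find?
        (fun m => PySem.Str.slice q (some (k : Int)) (some ((k : Int) + PySem.Str.len m)) == m) with
      _ | m0
    · -- no marker matches at position k: fold at k+1 agrees with fold at k
      have hcong : ∀ m ∈ aMarkers, pvRb q.toList m.toList (k + 1) = pvRb q.toList m.toList k := by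
        intro m hm
        have hfalse := List.find?_eq_none.mp hfind m (pvMarkers_eq ▸ hm)
        have : ¬ m.toList <+: q.toList.drop k := fun hpre =>
          hfalse (by simpa using (pvTest_iff q m k).mpr hpre)
        simp only [pvRb]
        rw [if_neg (fun h => this (List.isPrefixOf_iff_prefix.mp h))]
      have hfold : aMarkers.foldl (pvStep (fun m => pvRb q.toList m.toList (k + 1))) (-1, 0) =
          aMarkers.foldl (pvStep (fun m => pvRb q.toList m.toList k)) (-1, 0) :=
        PySem.List.foldl_congr_mem _ _ _ _
          (fun st m hm => by simp only [pvStep, hcong m hm])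
      rw [hfold]
      simpa only [bScan, hfind] using ih
    · -- marker m0 matches at position k (and it is the only one that does)
      have hmem : m0 ∈ aMarkers := pvMarkers_eq ▸ List.mem_of_find?_eq_some hfind
      have hp : (PySem.Str.slice q (some (k : Int)) (some ((k : Int) + PySem.Str.len m0)) == m0)
          = true := by simpa using List.find?_some hfind
      have hpre : m0.toList <+: q.toList.drop k := (pvTest_iff q m0 k).mp hp
      have hf0 : pvRb q.toList m0.toList (k + 1) = (k : Int) := by
        simp only [pvRb]
        rw [if_pos (List.isPrefixOf_iff_prefix.mpr hpre)]
      have hlt : ∀ m ∈ aMarkers, m ≠ m0 → pvRb q.toList m.toList (k + 1) < (k : Int) := by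
        intro m hm hne
        have : ¬ m.toList <+: q.toList.drop k := by
          intro hpre'
          rcases List.prefix_or_prefix_of_prefix hpre' hpre with h | h
          · exact hne (pvMarkers_uniq m hm m0 hmem h)
          · exact hne (pvMarkers_uniq m0 hmem m hm h).symm
        simp only [pvRb]
        rw [if_neg (fun h => this (List.isPrefixOf_iff_prefix.mp h))]
        exact pvRb_lt q.toList m.toList k
      rw [pvFold_pick _ _ _ m0 (k : Int) hmem hf0 hlt (by omega)]
      simp only [bScan, hfind]
      rw [if_pos (by omega)]

-- ===== VERDICT (by name: the statement is the Claim_ definition above) =====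
theorem focus_text_spec : Claim_equal_focus_text := by
  intro query _
  show focus_text query = focus_text_alt query
  have hA : focus_text query =
      (if (aMarkers.foldl (pvStep (fun m => PySem.Str.rfind (PySem.Str.lower query) m)) (-1, 0)).1 ≠ -1 then
        PySem.Str.strip (PySem.Str.slice query
          (some ((aMarkers.foldl (pvStep (fun m => PySem.Str.rfind (PySem.Str.lower query) m)) (-1, 0)).1 +
                 (aMarkers.foldl (pvStep (fun m => PySem.Str.rfind (PySem.Str.lower query) m)) (-1, 0)).2)) none)
      else query) := rfl
  have hB : focus_text_alt query =
      bScan (PySem.Str.lower query) query (PySem.Str.len (PySem.Str.lower query)).toNat := rfl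
  have hidx : ∀ m ∈ aMarkers, PySem.Str.rfind (PySem.Str.lower query) m =
      pvRb (PySem.Str.lower query).toList m.toList (PySem.Str.lower query).toList.length := by
    intro m hm
    rw [PySem.Str.rfind_eq, pvRfind_eq]
    exact pvRb_top _ _ (pvMarkers_ne_nil m hm)
  have hfold := PySem.List.foldl_congr_mem aMarkers
    (pvStep (fun m => PySem.Str.rfind (PySem.Str.lower query) m))
    (pvStep (fun m => pvRb (PySem.Str.lower query).toList m.toList
      (PySem.Str.lower query).toList.length)) ((-1 : Int), (0 : Int))
    (fun st m hm => by simp only [pvStep, hidx m hm])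
  have hlen : (PySem.Str.len (PySem.Str.lower query)).toNat =
      (PySem.Str.lower query).toList.length := by simp [PySem.Str.len]
  rw [hA, hB, hfold, hlen,
    pvScan_eq (PySem.Str.lower query) query (PySem.Str.lower query).toList.length]
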